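-- pv_equiv track=rewrite | github.com/fabioantonioastore/Euler-Project | problem_95.py | evaluate_chain
-- ===== SOURCE A (Python) =====
-- LIMIT = 1_000_000
--
-- amicable_cache = {}
--
-- def proper_divisors(n: int) -> list[int]:
--     divisors = [1]
--     sqrt = int(n ** (1 / 2))
--     if n % 2 == 0:
--         for i in range(2, sqrt + 1):
--             if n % i == 0:
--                 divisors.extend([i, n // i])
--         return divisors
--     for i in range(3, sqrt + 1, 2):
--         if n % i == 0:
--             divisors.extend([i, n // i])
--     return divisors
--
-- def next_amicable(n: int) -> int:
--     if n in amicable_cache: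
--         return amicable_cache[n]
--     divisors = proper_divisors(n)
--     amicable_cache[n] = sum(divisors)
--     return amicable_cache[n]
--
-- def evaluate_chain(start_n: int, n: int = None, chain: list[int] = None) -> list[int]:
--     if not n:
--         n = start_n
--     if not chain:
--         chain = []
--     if n > LIMIT:
--         return []
--     if n == start_n and len(chain) != 0:
--         return chain
--     if n in chain:
--         return []
--     chain.append(n)
--     new_n = next_amicable(n)
--     return evaluate_chain(start_n, new_n, chain)
-- ===== SOURCE B (Python) =====
-- LIMIT = 1_000_000
--
--
-- def _aliquot(n: int) -> int:
--     s = 1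
--     i = 2
--     while i * i <= n:
--         if n % i == 0:
--             s += i + n // i
--         i += 1
--     return s
--
--
-- def evaluate_chain(start_n: int, n: int = None, chain: list[int] = None) -> list[int]:
--     def walk(cur, visited):
--         if cur > LIMIT:
--             return None
--         if cur == start_n and visited:
--             return []
--         if cur in visited:
--             return None
--         rest = walk(_aliquot(cur), visited | {cur})
--         return None if rest is None else [cur] + rest
--
--     cur = n if n else start_n
--     base = chain if chain else []
--     rest = walk(cur, frozenset(base))
--     return [] if rest is None else base + rest
-- ===== Notes on version B (the rewrite author's own statement) =====
-- stated objective: alternative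
-- what changed: B replaces A's forward-accumulating tail recursion by an Option-returning recursion that builds only the newly visited suffix back-to-front (prepending the base afterwards, with set membership), and replaces A's parity-split range loops over a float-sqrt bound by a single while i*i<=n trial-division sum; B does not mutate the caller's chain list.
import Mathlib
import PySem

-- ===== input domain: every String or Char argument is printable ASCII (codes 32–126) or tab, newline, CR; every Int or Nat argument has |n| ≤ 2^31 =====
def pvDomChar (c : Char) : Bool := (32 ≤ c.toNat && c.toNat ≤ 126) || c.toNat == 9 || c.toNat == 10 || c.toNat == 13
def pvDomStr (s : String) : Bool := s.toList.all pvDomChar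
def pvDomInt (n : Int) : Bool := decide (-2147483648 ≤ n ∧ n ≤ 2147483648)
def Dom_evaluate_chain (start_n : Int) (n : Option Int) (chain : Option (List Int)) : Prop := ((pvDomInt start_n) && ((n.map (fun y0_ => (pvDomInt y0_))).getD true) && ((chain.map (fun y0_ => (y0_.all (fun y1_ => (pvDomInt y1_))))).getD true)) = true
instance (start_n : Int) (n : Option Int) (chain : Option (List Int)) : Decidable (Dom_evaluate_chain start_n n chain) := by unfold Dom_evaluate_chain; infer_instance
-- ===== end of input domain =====

-- B rebuilds the chain by an Option-returning recursion that constructs the newly visited suffix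
-- back-to-front (prepending the base at the end, with set membership) and computes the aliquot sum
-- by a single while i*i<=n trial-division loop instead of A's two parity-split range loops
-- (objective: alternative). A mutates a caller-supplied chain in place (append); B does not — the
-- equivalence proved here is about the RETURN value only.
-- Both unbounded Python loops are ported with an explicit fuel large enough that it can never run
-- out on the values the loops actually visit (fresh values of 0..1_000_000 for the chain loop,
-- i = 2..isqrt(n) for the divisor loop); the fuel is a totality device, not an algorithm switch.

-- ===== PORT A =====

-- int(n ** (1 / 2)) : exact integer sqrt for the values reached under Pre_ (0 ≤ n ≤ 1_000_000,
-- where the correctly rounded float sqrt truncates to the integer sqrt).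
def pvIsqrt (n : Int) : Int := ((Int.toNat n).sqrt : Int)

-- proper_divisors, transliterated: [1] extended by [i, n // i] over range(2, sqrt+1) for even n,
-- range(3, sqrt+1, 2) for odd n
def pvProperDivisors (n : Int) : List Int :=
  let divisors : List Int := [1]
  let sqrt := pvIsqrt n
  if PySem.Int.mod n 2 = 0 then
    (PySem.List.pyRange 2 (sqrt + 1) 1).foldl
      (fun ds i => if PySem.Int.mod n i = 0 then ds ++ [i, PySem.Int.floordiv n i] else ds) divisors
  else
    (PySem.List.pyRange 3 (sqrt + 1) 2).foldl
      (fun ds i => if PySem.Int.mod n i = 0 then ds ++ [i, PySem.Int.floordiv n i] else ds) divisors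

-- next_amicable: the module-level cache is pure memoization and does not affect the value
def pvNextAmicable (n : Int) : Int := (pvProperDivisors n).sum

-- the recursive body of A's evaluate_chain; fuel 1_000_002 never runs out on inputs inside Pre_
-- (every recursive step appends a fresh value of 0..1_000_000 to the chain)
def pvChainA : Nat → Int → Int → List Int → List Int
  | 0, _, _, _ => []
  | fuel + 1, start_n, n, chain =>
    if n > 1000000 then []
    else if n = start_n ∧ chain.length ≠ 0 then chain
    else if n ∈ chain then []
    else pvChainA fuel start_n (pvNextAmicable n) (chain ++ [n])

def evaluate_chain (start_n : Int) (n : Option Int) (chain : Option (List Int)) : List Int :=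
  -- `if not n: n = start_n` (None and 0 are falsy); `if not chain: chain = []`
  let n0 := match n with
    | none => start_n
    | some v => if v = 0 then start_n else v
  let chain0 := match chain with
    | none => ([] : List Int)
    | some c => c
  pvChainA 1000002 start_n n0 chain0

-- ===== PORT B =====

-- _aliquot's loop: while i * i <= n: if n % i == 0: s += i + n // i; i += 1; return s
-- (called with fuel n.toNat + 2 > number of iterations, which never runs out)
def pvDivSumLoop : Nat → Int → Int → Int → Int
  | 0, _, _, s => s
  | fuel + 1, n, i, s =>
    if i * i ≤ n then
      pvDivSumLoop fuel n (i + 1) (if PySem.Int.mod n i = 0 then s + (i + PySem.Int.floordiv n i) else s)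
    else s

-- walk(cur, visited): None on failure, else the list of newly visited values (built back-to-front)
def pvWalk : Nat → Int → Int → PySem.Set Int → Option (List Int)
  | 0, _, _, _ => none
  | fuel + 1, start_n, cur, visited =>
    if cur > 1000000 then none
    else if cur = start_n ∧ visited ≠ [] then some []
    else if cur ∈ visited then none
    else
      (pvWalk fuel start_n (pvDivSumLoop (cur.toNat + 2) cur 2 1) (PySem.Set.add visited cur)).map
        (fun rest => cur :: rest)

def evaluate_chain_alt (start_n : Int) (n : Option Int) (chain : Option (List Int)) : List Int :=
  let cur := match n with
    | none => start_n
    | some v => if v = 0 then start_n else v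
  let base := match chain with
    | none => ([] : List Int)
    | some c => c
  match pvWalk 1000002 start_n cur (PySem.Set.ofList base) with
  | none => []
  | some rest => base ++ rest

-- ===== PRECONDITION & SPEC =====

-- Pre_ excludes exactly the inputs on which the Python A raises TypeError (int() of a complex
-- square root): a negative effective start value that is not intercepted by the return guards.
def Pre_evaluate_chain (start_n : Int) (n : Option Int) (chain : Option (List Int)) : Prop :=
  let n0 := match n with
    | none => start_n
    | some v => if v = 0 then start_n else v
  let chain0 := match chain with
    | none => ([] : List Int)
    | some c => c
  0 ≤ n0 ∨ (n0 = start_n ∧ chain0 ≠ []) ∨ n0 ∈ chain0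

instance (start_n : Int) (n : Option Int) (chain : Option (List Int)) : Decidable (Pre_evaluate_chain start_n n chain) := by unfold Pre_evaluate_chain; infer_instance

def pvWitness_evaluate_chain : Int × Option Int × Option (List Int) := (6, none, none)

def Spec_evaluate_chain (start_n : Int) (n : Option Int) (chain : Option (List Int)) (out : List Int) : Prop := out = evaluate_chain_alt start_n n chain
instance (start_n : Int) (n : Option Int) (chain : Option (List Int)) (out : List Int) : Decidable (Spec_evaluate_chain start_n n chain out) := by unfold Spec_evaluate_chain; infer_instance

-- ===== CLAIM (what is proved, stated in full; the proofs are below) =====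
def Claim_equal_evaluate_chain : Prop := ∀ (start_n : Int) (n : Option Int) (chain : Option (List Int)), Dom_evaluate_chain start_n n chain → Pre_evaluate_chain start_n n chain → Spec_evaluate_chain start_n n chain (evaluate_chain start_n n chain)

-- ===== LEMMAS AND PROOFS =====

-- A's fold appends [i, n // i]; its sum is the base sum plus a sum of a map
theorem pvSumA (n : Int) (l : List Int) (acc : List Int) :
    (l.foldl (fun ds i => if PySem.Int.mod n i = 0 then ds ++ [i, PySem.Int.floordiv n i] else ds) acc).sum
      = acc.sum + (l.map (fun i => if PySem.Int.mod n i = 0 then i + PySem.Int.floordiv n i else 0)).sum := by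
  induction l generalizing acc with
  | nil => simp
  | cons x xs ih =>
    simp only [List.foldl_cons, List.map_cons, List.sum_cons, ih]
    split_ifs
    · simp only [List.sum_append, List.sum_cons, List.sum_nil]
      ring
    · ring

-- B's while loop, with enough fuel left, equals 'start value + sum of the same map over
-- range(i, isqrt(n)+1)'
theorem pvSumB (n : Int) (hn : 0 ≤ n) : ∀ (fuel : Nat) (i s : Int), 1 ≤ i →
    (pvIsqrt n + 1 - i).toNat < fuel →
    pvDivSumLoop fuel n i s
      = s + ((PySem.List.pyRange i (pvIsqrt n + 1) 1).map
              (fun j => if PySem.Int.mod n j = 0 then j + PySem.Int.floordiv n j else 0)).sum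
  | 0, i, s, _, hfuel => absurd hfuel (by omega)
  | fuel + 1, i, s, hi, hfuel => by
    by_cases h : i * i ≤ n
    · have hsq : i ≤ pvIsqrt n := by
        unfold pvIsqrt
        have h1 : i.toNat * i.toNat ≤ n.toNat := by
          zify [Int.toNat_of_nonneg hn, Int.toNat_of_nonneg (show (0:Int) ≤ i by omega)]
          exact h
        have := (Nat.le_sqrt).mpr h1
        omega
      rw [pvDivSumLoop, if_pos h,
          PySem.List.pyRange_one_cons (by omega : i < pvIsqrt n + 1),
          List.map_cons, List.sum_cons,
          pvSumB n hn fuel (i + 1) _ (by omega) (by omega)]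
      split_ifs <;> ring
    · have hsq : pvIsqrt n < i := by
        by_contra hc
        push Not at hc
        unfold pvIsqrt at hc
        have h1 : i.toNat ≤ n.toNat.sqrt := by omega
        have h2 := Nat.le_sqrt.mp h1
        have h3 : (i.toNat : Int) = i := Int.toNat_of_nonneg (by omega)
        have h4 : ((i.toNat * i.toNat : Nat) : Int) ≤ ((n.toNat : Nat) : Int) := by exact_mod_cast h2
        push_cast at h4
        rw [h3] at h4
        omega
      rw [pvDivSumLoop, if_neg h, PySem.List.pyRange_one_eq_nil (by omega)]
      simp

theorem pvNodup_pyRange_two (a b : Int) : (PySem.List.pyRange a b 2).Nodup := by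
  rw [PySem.List.pyRange_of_pos a b (by norm_num)]
  refine List.Nodup.map ?_ (List.nodup_range)
  intro x y hxy
  have hxy' : a + 2 * (x : Int) = a + 2 * (y : Int) := hxy
  omega

-- for odd n, the odd-step range 3,5,… and the full range 2,3,… give the same divisor sum
theorem pvOddRangeSum (n m : Int) (hodd : ¬ PySem.Int.mod n 2 = 0) :
    ((PySem.List.pyRange 3 m 2).map (fun i => if PySem.Int.mod n i = 0 then i + PySem.Int.floordiv n i else 0)).sum
      = ((PySem.List.pyRange 2 m 1).map (fun i => if PySem.Int.mod n i = 0 then i + PySem.Int.floordiv n i else 0)).sum := by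
  set g : Int → Int := fun i => if PySem.Int.mod n i = 0 then i + PySem.Int.floordiv n i else 0 with hg
  have h2 : ((PySem.List.pyRange 3 m 2).toFinset.sum g) = ((PySem.List.pyRange 3 m 2).map g).sum :=
    List.sum_toFinset g (pvNodup_pyRange_two 3 m)
  have h1 : ((PySem.List.pyRange 2 m 1).toFinset.sum g) = ((PySem.List.pyRange 2 m 1).map g).sum :=
    List.sum_toFinset g (PySem.List.nodup_pyRange_one 2 m)
  rw [← h1, ← h2]
  apply Finset.sum_subset
  · intro x hx
    rw [List.mem_toFinset] at hx ⊢
    rw [PySem.List.mem_pyRange_iff_of_pos (by norm_num)] at hx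
    rw [PySem.List.mem_pyRange_one]
    omega
  · intro x hx hnx
    rw [List.mem_toFinset, PySem.List.mem_pyRange_one] at hx
    rw [List.mem_toFinset, PySem.List.mem_pyRange_iff_of_pos (by norm_num)] at hnx
    have heven : (2 : Int) ∣ x := by omega
    have hxpos : (0 : Int) < x := by omega
    show (if PySem.Int.mod n x = 0 then x + PySem.Int.floordiv n x else 0) = 0
    rw [if_neg]
    intro hmod
    rw [PySem.Int.mod_eq_emod_of_pos hxpos] at hmod
    have hdvd : x ∣ n := Int.dvd_of_emod_eq_zero hmod
    have : (2 : Int) ∣ n := dvd_trans heven hdvd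
    apply hodd
    rw [PySem.Int.mod_eq_emod_of_pos (by norm_num : (0:Int) < 2)]
    omega

-- the two divisor-sum computations agree (for n < 0 both loops are empty and give 1)
theorem pvNextEq (n : Int) : pvNextAmicable n = pvDivSumLoop (n.toNat + 2) n 2 1 := by
  by_cases hn : 0 ≤ n
  · have hfuel : (pvIsqrt n + 1 - 2).toNat < n.toNat + 2 := by
      unfold pvIsqrt
      have := Nat.sqrt_le_self n.toNat
      omega
    unfold pvNextAmicable pvProperDivisors
    rw [pvSumB n hn (n.toNat + 2) 2 1 (by norm_num) hfuel]
    by_cases h : PySem.Int.mod n 2 = 0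
    · rw [if_pos h, pvSumA]
      have e : ([1] : List Int).sum = 1 := rfl
      rw [e]
    · rw [if_neg h, pvSumA, pvOddRangeSum n (pvIsqrt n + 1) h]
      have e : ([1] : List Int).sum = 1 := rfl
      rw [e]
  · have hz : pvIsqrt n = 0 := by
      unfold pvIsqrt
      have : n.toNat = 0 := by omega
      rw [this]
      rfl
    have hz2 : n.toNat = 0 := by omega
    have hB : pvDivSumLoop (n.toNat + 2) n 2 1 = 1 := by
      rw [hz2]
      show pvDivSumLoop 2 n 2 1 = 1
      rw [pvDivSumLoop, if_neg (by nlinarith : ¬ (2 : Int) * 2 ≤ n)]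
    have hr1 : PySem.List.pyRange 2 (pvIsqrt n + 1) 1 = [] := by
      rw [hz]; rfl
    have hr2 : PySem.List.pyRange 3 (pvIsqrt n + 1) 2 = [] := by
      rw [hz]; rfl
    unfold pvNextAmicable pvProperDivisors
    rw [hB]
    by_cases h : PySem.Int.mod n 2 = 0
    · rw [if_pos h, hr1]; rfl
    · rw [if_neg h, hr2]; rfl

-- A's forward accumulation equals B's back-to-front walk at every fuel, whenever `visited` has
-- the same members as A's chain
theorem pvChainEq (s : Int) : ∀ (fuel : Nat) (n : Int) (chain : List Int) (seen : PySem.Set Int),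
    (∀ x : Int, x ∈ seen ↔ x ∈ chain) →
    pvChainA fuel s n chain
      = (match pvWalk fuel s n seen with
         | none => []
         | some rest => chain ++ rest)
  | 0, n, chain, seen, _ => rfl
  | fuel + 1, n, chain, seen, hinv => by
    have hnil : (seen = []) ↔ (chain = []) := by
      constructor
      · intro h
        by_contra hc
        obtain ⟨x, hx⟩ := List.exists_mem_of_ne_nil chain hc
        exact (List.ne_nil_of_mem ((hinv x).mpr hx)) h
      · intro h
        by_contra hc
        obtain ⟨x, hx⟩ := List.exists_mem_of_ne_nil seen hc
        exact (List.ne_nil_of_mem ((hinv x).mp hx)) h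
    have hseen_ne : (seen ≠ []) ↔ (chain.length ≠ 0) := by
      rw [Ne, Ne, List.length_eq_zero_iff, hnil]
    rw [pvChainA, pvWalk]
    by_cases h1 : n > 1000000
    · rw [if_pos h1, if_pos h1]
    rw [if_neg h1, if_neg h1]
    by_cases h2 : n = s ∧ chain.length ≠ 0
    · rw [if_pos h2, if_pos ⟨h2.1, hseen_ne.mpr h2.2⟩]
      simp
    rw [if_neg h2, if_neg (show ¬ (n = s ∧ seen ≠ []) from fun hc => h2 ⟨hc.1, hseen_ne.mp hc.2⟩)]
    by_cases h3 : n ∈ chain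
    · rw [if_pos h3, if_pos ((hinv n).mpr h3)]
    rw [if_neg h3, if_neg (show ¬ n ∈ seen from fun hc => h3 ((hinv n).mp hc))]
    have hinv' : ∀ x : Int, x ∈ PySem.Set.add seen n ↔ x ∈ chain ++ [n] := by
      intro x
      rw [PySem.Set.mem_add, List.mem_append, List.mem_singleton, hinv]
    rw [pvNextEq n, pvChainEq s fuel (pvDivSumLoop (n.toNat + 2) n 2 1) (chain ++ [n]) (PySem.Set.add seen n) hinv']
    cases pvWalk fuel s (pvDivSumLoop (n.toNat + 2) n 2 1) (PySem.Set.add seen n) with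
    | none => rfl
    | some rest => simp [Option.map]

-- ===== VERDICT (by name: the statement is the Claim_ definition above) =====
theorem evaluate_chain_spec : Claim_equal_evaluate_chain := by
  intro start_n n chain _hdom _hpre
  unfold Spec_evaluate_chain
  cases n <;> cases chain <;>
    simp only [evaluate_chain, evaluate_chain_alt] <;>
    exact pvChainEq _ _ _ _ _ (fun x => PySem.Set.mem_ofList _ x)
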